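-- pv_equiv track=rewrite | github.com/xulanxin30-tech/COMP2090SEF-Group-Project-XU-Lan-Xin- | COMP2090SEF-Task2/Task2.py | shell_hibbard_gaps
-- ===== SOURCE A (Python) =====
-- from typing import List, Callable, Generator
--
-- def shell_hibbard_gaps(n: int) -> Generator[int, None, None]:
--     """Hibbard's gaps: 2^k - 1 (..., 15, 7, 3, 1)."""
--     k = 1
--     while True:
--         gap = (1 << k) - 1   # 2^k - 1
--         if gap >= n:
--             break
--         k += 1
--     k -= 1
--     while k >= 1:
--         yield (1 << k) - 1
--         k -= 1
-- ===== SOURCE B (Python) =====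
-- def shell_hibbard_gaps(n):
--     """Hibbard's gaps: 2^k - 1 (..., 15, 7, 3, 1)."""
--     def emit(g):
--         # recurse upward while the doubled gap is still below n,
--         # then yield on the way back down the call stack (descending order)
--         if 2 * g + 1 < n:
--             yield from emit(2 * g + 1)
--         yield g
--     if 1 < n:
--         yield from emit(1)
-- ===== Notes on version B (the rewrite author's own statement) =====
-- stated objective: alternative
-- what changed: B is a recursive generator: it recurses upward on the gap value itself (doubling-plus-one step, no exponent counter and no search phase) and yields each gap after the recursive call returns, so the descending order comes from the unwinding call stack instead of A's two-phase find-largest-k-then-count-k-down recomputation of the power-of-two gaps.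
import Mathlib
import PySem

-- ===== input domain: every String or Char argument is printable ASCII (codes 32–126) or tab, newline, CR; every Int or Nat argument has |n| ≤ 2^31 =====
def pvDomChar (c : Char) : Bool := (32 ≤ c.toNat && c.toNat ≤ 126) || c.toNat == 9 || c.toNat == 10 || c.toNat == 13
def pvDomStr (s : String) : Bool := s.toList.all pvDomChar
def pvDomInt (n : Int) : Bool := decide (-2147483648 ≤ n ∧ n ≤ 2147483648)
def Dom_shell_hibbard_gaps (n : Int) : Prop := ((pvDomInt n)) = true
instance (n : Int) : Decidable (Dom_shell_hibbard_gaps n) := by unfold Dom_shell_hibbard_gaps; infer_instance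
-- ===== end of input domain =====

-- B replaces A's two-phase search-then-countdown with a recursive generator on the gap value
-- (doubling-plus-one step, yield after return), emitting the descending order from the call stack; alternative decomposition.


-- ===== PORT A =====
-- first while loop of A: advance k until (1 << k) - 1 ≥ n; returns that k
def hibFindK (n : Int) (k : Nat) : Nat :=
  if (2 ^ k : Int) - 1 ≥ n then k else hibFindK n (k + 1)
termination_by (n + 1 - 2 ^ k).toNat
decreasing_by
  have _h2 : (2:Int) ^ (k+1) = 2 * 2 ^ k := by ring
  have hp : (0:Int) < 2 ^ k := by positivity
  simp only [not_le] at *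
  omega

-- second while loop of A: yield (1 << k) - 1 while k ≥ 1, decrementing
def hibDown (k : Nat) : List Int :=
  match k with
  | 0 => []
  | Nat.succ m => ((2 ^ (m + 1) : Int) - 1) :: hibDown m

def shell_hibbard_gaps (n : Int) : List Int :=
  hibDown (hibFindK n 1 - 1)

-- ===== PORT B =====
-- B's recursive generator emit(g): recurse on 2g+1 while it is < n, yield g afterwards.
-- g is always a positive integer in B (it starts at 1 and only grows), so it is a Nat here.
def hibEmit (n : Int) (g : Nat) : List Int :=
  (if 2 * (g : Int) + 1 < n then hibEmit n (2 * g + 1) else []) ++ [(g : Int)]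
termination_by (n - g).toNat
decreasing_by
  have : (0:Int) ≤ (g : Int) := Int.natCast_nonneg g
  push_cast
  omega

def shell_hibbard_gaps_alt (n : Int) : List Int :=
  if 1 < n then hibEmit n 1 else []

-- ===== PRECONDITION & SPEC =====
def Spec_shell_hibbard_gaps (n : Int) (out : List Int) : Prop := out = shell_hibbard_gaps_alt n
instance (n : Int) (out : List Int) : Decidable (Spec_shell_hibbard_gaps n out) := by unfold Spec_shell_hibbard_gaps; infer_instance

-- ===== CLAIM (what is proved, stated in full; the proofs are below) =====
def Claim_equal_shell_hibbard_gaps : Prop := ∀ (n : Int), Dom_shell_hibbard_gaps n → Spec_shell_hibbard_gaps n (shell_hibbard_gaps n)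

-- ===== LEMMAS AND PROOFS =====

theorem hibFindK_ge (n : Int) (k : Nat) : k ≤ hibFindK n k := by
  fun_induction hibFindK n k with
  | case1 => exact le_refl _
  | case2 k h ih => omega

theorem hibDown_reverse (m : Nat) :
    hibDown m = ((List.range' 1 m).map (fun j => (2 ^ j : Int) - 1)).reverse := by
  induction m with
  | zero => simp [hibDown]
  | succ m ih =>
    rw [hibDown, ih, List.range'_1_concat, List.map_append, List.reverse_append]
    simp [Nat.add_comm 1 m]

theorem emit_eq (n : Int) (j : Nat) (hj : 1 ≤ j) (h : (2 ^ j : Int) - 1 < n) :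
    hibEmit n (2 ^ j - 1) =
      ((List.range' j (hibFindK n j - j)).map (fun i => (2 ^ i : Int) - 1)).reverse := by
  have hpow : 1 ≤ 2 ^ j := Nat.one_le_two_pow
  have hcast : ((2 ^ j - 1 : Nat) : Int) = (2 ^ j : Int) - 1 := by push_cast [hpow]; ring
  have hstep : 2 * (2 ^ j - 1) + 1 = 2 ^ (j + 1) - 1 := by
    have : 2 ^ (j + 1) = 2 * 2 ^ j := by ring
    omega
  have hnextc : ((2 ^ (j + 1) - 1 : Nat) : Int) = (2 ^ (j + 1) : Int) - 1 := by
    push_cast [Nat.one_le_two_pow (n := j + 1)]; ring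
  rw [hibEmit, hcast, hstep]
  by_cases h2 : (2 ^ (j + 1) : Int) - 1 < n
  · have hc : (2:Int) * (2 ^ j - 1) + 1 < n := by
      have : (2:Int) * (2 ^ j - 1) + 1 = 2 ^ (j + 1) - 1 := by ring
      omega
    rw [if_pos hc]
    rw [emit_eq n (j + 1) (by omega) h2]
    have hK : hibFindK n j = hibFindK n (j + 1) := by
      rw [hibFindK, if_neg (by omega)]
    have hKge : j + 1 ≤ hibFindK n (j + 1) := hibFindK_ge n (j + 1)
    have hlen : hibFindK n j - j = (hibFindK n (j + 1) - (j + 1)) + 1 := by omega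
    rw [hlen, List.range'_succ, List.map_cons, List.reverse_cons]
  · have hc : ¬ ((2:Int) * (2 ^ j - 1) + 1 < n) := by
      have : (2:Int) * (2 ^ j - 1) + 1 = 2 ^ (j + 1) - 1 := by ring
      omega
    rw [if_neg hc]
    have hK : hibFindK n j = j + 1 := by
      rw [hibFindK, if_neg (by omega), hibFindK, if_pos (by omega)]
    rw [hK]
    simp [List.range'_succ]
termination_by (n - 2 ^ j).toNat
decreasing_by
  have _h1 : (2:Int) ^ (j+1) = 2 * 2 ^ j := by ring
  have _hp : (0:Int) < 2 ^ j := by positivity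
  omega

-- ===== VERDICT (by name: the statement is the Claim_ definition above) =====
theorem shell_hibbard_gaps_spec : Claim_equal_shell_hibbard_gaps := by
  intro n _
  unfold Spec_shell_hibbard_gaps shell_hibbard_gaps shell_hibbard_gaps_alt
  by_cases h : 1 < n
  · rw [if_pos h]
    have h1 : (2 ^ 1 : Int) - 1 < n := by norm_num; omega
    have := emit_eq n 1 (le_refl 1) h1
    norm_num at this
    rw [this, hibDown_reverse]
  · rw [if_neg h]
    have hK : hibFindK n 1 = 1 := by rw [hibFindK, if_pos (by norm_num; omega)]
    rw [hK]
    simp [hibDown]
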